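-- pv_equiv track=rewrite | github.com/skyqnaqna/algorithm_study | programmers/카카오/자물쇠와열쇠.py | solution
-- ===== SOURCE A (Python) =====
-- import copy
--
-- def solution(key, lock):
--     answer = False
--     length = len(lock)
--     keyLen = len(key)
--     graph = [[0] * (length * 3) for _ in range(length * 3)]
--
--     resetGraph(graph, lock, length)
--
--     for _ in range(4):
--         for r in range(len(graph) - keyLen):
--             for c in range(len(graph) - keyLen):
--                 for i in range(keyLen):
--                     for j in range(keyLen):
--                         graph[r+i][c+j] += key[i][j]
--
--                 if checkLock(graph, length):
--                     return True
--                 else: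
--                     resetGraph(graph, lock, length)
--
--         rotateRight(key)
--
--     return answer
--
-- def resetGraph(graph, lock, length):
--     for i in range(length):
--         for j in range(length):
--             graph[i + length][j + length] = lock[i][j]
--
-- def rotateRight(arr):
--     length = len(arr)
--     temp = copy.deepcopy(arr)
--
--     for i in range(length):
--         for j in range(length):
--             arr[j][length - 1 - i] = temp[i][j]
--
-- def checkLock(arr, length):
--     for i in range(length):
--         for j in range(length):
--             if arr[i+length][j+length] != 1:
--                 return False
--     return True
-- ===== SOURCE B (Python) =====
-- def solution(key, lock):
--     L = len(lock)
--     K = len(key)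
--
--     def fits(rot, r, c):
--         # placement valid iff every lock cell plus the key cell landing on it sums to 1
--         for i in range(L):
--             for j in range(L):
--                 a, b = i + L - r, j + L - c
--                 v = lock[i][j]
--                 if 0 <= a < K and 0 <= b < K:
--                     v += rot[a][b]
--                 if v != 1:
--                     return False
--         return True
--
--     rot = [row[:] for row in key]
--     for _ in range(4):
--         if any(fits(rot, r, c) for r in range(3 * L - K) for c in range(3 * L - K)):
--             return True
--         rot = [[rot[K - 1 - b][a] for b in range(K)] for a in range(K)]
--     return False
-- ===== Notes on version B (the rewrite author's own statement) =====
-- stated objective: alternative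
-- what changed: B drops A's mutable 3Lx3L scratch grid entirely: no graph allocation, no add/reset passes and no in-place key rotation; each placement is judged directly per lock cell via index arithmetic (with early exit), and rotations are fresh comprehensions, leaving the caller's key unmutated.
import Mathlib
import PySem

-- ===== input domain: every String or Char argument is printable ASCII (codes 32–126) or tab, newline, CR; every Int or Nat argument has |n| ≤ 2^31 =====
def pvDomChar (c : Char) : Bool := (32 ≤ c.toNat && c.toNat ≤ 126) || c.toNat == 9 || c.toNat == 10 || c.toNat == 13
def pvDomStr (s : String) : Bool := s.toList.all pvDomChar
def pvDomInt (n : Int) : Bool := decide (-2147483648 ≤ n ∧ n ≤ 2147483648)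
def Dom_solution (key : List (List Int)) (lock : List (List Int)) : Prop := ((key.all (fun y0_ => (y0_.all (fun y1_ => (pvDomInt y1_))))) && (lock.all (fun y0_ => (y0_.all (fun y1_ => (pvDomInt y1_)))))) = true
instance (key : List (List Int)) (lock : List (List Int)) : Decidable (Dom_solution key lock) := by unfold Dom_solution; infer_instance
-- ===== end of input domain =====

-- B replaces A's mutable 3L×3L scratch grid (add key / check / reset each placement, in-place key
-- rotation) by a direct per-lock-cell test with index arithmetic and fresh rotated copies.
-- NOTE on side effects: Python A rotates its `key` argument in place (net identity only when it
-- returns False); the equivalence proved here is about the RETURN value only. B does not mutate.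

-- ===== PORT A =====
-- graph[i][j] read / write (all indices A uses are in range under Pre_)
def pvGet2 (g : List (List Int)) (i j : Nat) : Int := (g.getD i []).getD j 0
def pvSet2 (g : List (List Int)) (i j : Nat) (v : Int) : List (List Int) :=
  g.set i ((g.getD i []).set j v)
-- `for i in range m: for j in range n:` as one list of index pairs, in iteration order
def pvPairs (m n : Nat) : List (Nat × Nat) :=
  (List.range m).flatMap (fun i => (List.range n).map (fun j => (i, j)))
def resetGraph (graph : List (List Int)) (lock : List (List Int)) (length : Nat) : List (List Int) :=
  (pvPairs length length).foldl
    (fun g p => pvSet2 g (p.1 + length) (p.2 + length) (pvGet2 lock p.1 p.2)) graph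
def rotateRightA (arr : List (List Int)) : List (List Int) :=
  let length := arr.length
  (pvPairs length length).foldl
    (fun a p => pvSet2 a p.2 (length - 1 - p.1) (pvGet2 arr p.1 p.2)) arr
def checkLock (arr : List (List Int)) (length : Nat) : Bool :=
  (List.range length).all (fun i => (List.range length).all (fun j =>
    pvGet2 arr (i + length) (j + length) == 1))
def addKey (g : List (List Int)) (key : List (List Int)) (keyLen r c : Nat) : List (List Int) :=
  (pvPairs keyLen keyLen).foldl
    (fun g p => pvSet2 g (r + p.1) (c + p.2) (pvGet2 g (r + p.1) (c + p.2) + pvGet2 key p.1 p.2)) g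
-- the r/c double loop with its early `return True` and else-reset
def placeLoop (key lock : List (List Int)) (length keyLen : Nat) :
    List (Nat × Nat) → List (List Int) → Bool × List (List Int)
  | [], g => (false, g)
  | rc :: rest, g =>
      let g' := addKey g key keyLen rc.1 rc.2
      if checkLock g' length then (true, g')
      else placeLoop key lock length keyLen rest (resetGraph g' lock length)
-- `for _ in range(4):` with the rotation at the end of each pass
def rotLoopA (lock : List (List Int)) (length keyLen : Nat) :
    Nat → List (List Int) → List (List Int) → Bool
  | 0, _, _ => false
  | t + 1, key, g =>
      match placeLoop key lock length keyLen
              (pvPairs (3 * length - keyLen) (3 * length - keyLen)) g with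
      | (true, _) => true
      | (false, g') => rotLoopA lock length keyLen t (rotateRightA key) g'
def solution (key : List (List Int)) (lock : List (List Int)) : Bool :=
  let length := lock.length
  let keyLen := key.length
  let graph := (List.range (3 * length)).map (fun _ => (List.range (3 * length)).map (fun _ => (0 : Int)))
  rotLoopA lock length keyLen 4 key (resetGraph graph lock length)

-- ===== PORT B =====
-- one placement: every lock cell plus the key cell landing on it must sum to 1 (early exit)
def fitsB (lock rot : List (List Int)) (L K r c : Nat) : Bool :=
  (List.range L).all (fun i => (List.range L).all (fun j =>
    let a : Int := (i : Int) + L - r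
    let b : Int := (j : Int) + L - c
    let v : Int := pvGet2 lock i j +
      (if 0 ≤ a ∧ a < K ∧ 0 ≤ b ∧ b < K then pvGet2 rot a.toNat b.toNat else 0)
    v == 1))
-- `[[rot[K-1-b][a] for b in range(K)] for a in range(K)]`
def rotateB (rot : List (List Int)) (K : Nat) : List (List Int) :=
  (List.range K).map (fun a => (List.range K).map (fun b => pvGet2 rot (K - 1 - b) a))
def rotLoopB (lock : List (List Int)) (L K : Nat) : Nat → List (List Int) → Bool
  | 0, _ => false
  | t + 1, rot =>
      if (List.range (3 * L - K)).any (fun r => (List.range (3 * L - K)).any (fun c =>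
           fitsB lock rot L K r c))
      then true
      else rotLoopB lock L K t (rotateB rot K)
def solution_alt (key : List (List Int)) (lock : List (List Int)) : Bool :=
  -- `[row[:] for row in key]` copies rows; functionally the identity here
  rotLoopB lock lock.length key.length 4 key

-- ===== PRECONDITION & SPEC =====
-- Exactly where Python A returns normally: every row of `key` has at least len(key) entries and
-- every row of `lock` at least len(lock); a shorter row raises IndexError (in resetGraph, the
-- key-addition loop or rotateRight before any value can be returned).
def Pre_solution (key : List (List Int)) (lock : List (List Int)) : Prop :=
  (∀ row ∈ key, key.length ≤ row.length) ∧ (∀ row ∈ lock, lock.length ≤ row.length)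
instance (key : List (List Int)) (lock : List (List Int)) : Decidable (Pre_solution key lock) := by
  unfold Pre_solution; infer_instance
def pvWitness_solution : List (List Int) × List (List Int) :=
  ([[0, 0], [1, 0]], [[1, 1], [1, 0]])
def Spec_solution (key : List (List Int)) (lock : List (List Int)) (out : Bool) : Prop := out = solution_alt key lock
instance (key : List (List Int)) (lock : List (List Int)) (out : Bool) : Decidable (Spec_solution key lock out) := by unfold Spec_solution; infer_instance

-- ===== CLAIM (what is proved, stated in full; the proofs are below) =====
def Claim_equal_solution : Prop := ∀ (key : List (List Int)) (lock : List (List Int)), Dom_solution key lock → Pre_solution key lock → Spec_solution key lock (solution key lock)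

-- ===== LEMMAS AND PROOFS =====

-- shape/state invariants used by the proofs
def Shape (L : Nat) (g : List (List Int)) : Prop :=
  g.length = 3 * L ∧ ∀ p < 3 * L, ((g.getD p []).length) = 3 * L
def Center (L : Nat) (lock g : List (List Int)) : Prop :=
  ∀ i < L, ∀ j < L, pvGet2 g (i + L) (j + L) = pvGet2 lock i j
def KeyRel (K : Nat) (key rot : List (List Int)) : Prop :=
  key.length = K ∧ (∀ p < K, K ≤ (key.getD p []).length) ∧
  ∀ i < K, ∀ j < K, pvGet2 key i j = pvGet2 rot i j

-- Bool .all respects pointwise-equal predicates (no such congruence lemma exists in the library)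
lemma all_congr_mem (l : List Nat) (f g : Nat → Bool) (h : ∀ x ∈ l, f x = g x) :
    l.all f = l.all g := by
  induction l with
  | nil => rfl
  | cons x xs ih => simp only [List.all_cons, h x (by simp), ih (fun y hy => h y (by simp [hy]))]

-- generic "sequence of cell writes" form that resetGraph / rotateRightA / addKey all share
def pvW (tgt : Nat × Nat → Nat × Nat) (val : List (List Int) → Nat × Nat → Int)
    (l : List (Nat × Nat)) (g : List (List Int)) : List (List Int) :=
  l.foldl (fun g x => pvSet2 g (tgt x).1 (tgt x).2 (val g x)) g

lemma pvSet2_length (g : List (List Int)) (i j : Nat) (v : Int) :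
    (pvSet2 g i j v).length = g.length := by simp [pvSet2]

lemma pvSet2_rowlen (g : List (List Int)) (i j : Nat) (v : Int) (p : Nat) :
    ((pvSet2 g i j v).getD p []).length = (g.getD p []).length := by
  unfold pvSet2
  by_cases hpi : p = i
  · subst hpi
    by_cases hi : p < g.length
    · simp [List.getD, hi]
    · rw [List.set_eq_of_length_le (by omega)]
  · simp [List.getD, List.getElem?_set_ne (by omega : i ≠ p)]

lemma pvGet2_pvSet2_ne (g : List (List Int)) (i j p q : Nat) (v : Int)
    (h : (i, j) ≠ (p, q)) : pvGet2 (pvSet2 g i j v) p q = pvGet2 g p q := by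
  unfold pvGet2 pvSet2
  by_cases hip : i = p
  · subst hip
    have hjq : j ≠ q := fun hh => h (by rw [hh])
    by_cases hi : i < g.length
    · simp [List.getD, hi, List.getElem?_set_ne hjq]
    · rw [List.set_eq_of_length_le (by omega)]
  · simp [List.getD, List.getElem?_set_ne hip]

lemma pvGet2_pvSet2_self (g : List (List Int)) (i j : Nat) (v : Int)
    (hi : i < g.length) (hj : j < (g.getD i []).length) :
    pvGet2 (pvSet2 g i j v) i j = v := by
  unfold pvGet2 pvSet2
  have h1 : ((g.set i ((g.getD i []).set j v)).getD i []) = (g.getD i []).set j v := by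
    rw [List.getD_eq_getElem?_getD, List.getElem?_set_self (by simpa using hi)]; rfl
  rw [h1, List.getD_eq_getElem?_getD, List.getElem?_set_self (by simpa using hj)]; rfl

lemma pvW_length (tgt val l) : ∀ g, (pvW tgt val l g).length = g.length := by
  induction l with
  | nil => intro g; rfl
  | cons x xs ih => intro g; simpa [pvW, List.foldl_cons] using
      (ih (pvSet2 g (tgt x).1 (tgt x).2 (val g x))).trans (pvSet2_length ..)

lemma pvW_rowlen (tgt val l p) : ∀ g, ((pvW tgt val l g).getD p []).length = ((g.getD p []).length) := by
  induction l with
  | nil => intro g; rfl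
  | cons x xs ih => intro g; simpa [pvW, List.foldl_cons] using
      (ih (pvSet2 g (tgt x).1 (tgt x).2 (val g x))).trans (pvSet2_rowlen ..)

lemma pvW_get_miss (tgt val l p q) : ∀ g, (∀ x ∈ l, tgt x ≠ (p, q)) →
    pvGet2 (pvW tgt val l g) p q = pvGet2 g p q := by
  induction l with
  | nil => intro g _; rfl
  | cons x xs ih =>
      intro g h
      have h1 : tgt x ≠ (p, q) := h x (by simp)
      have := ih (pvSet2 g (tgt x).1 (tgt x).2 (val g x)) (fun y hy => h y (by simp [hy]))
      simp only [pvW, List.foldl_cons] at this ⊢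
      rw [this, pvGet2_pvSet2_ne]
      simpa using h1

lemma pvW_get_hit (tgt val l1 x l2 g)
    (_h1 : ∀ y ∈ l1, tgt y ≠ tgt x) (h2 : ∀ y ∈ l2, tgt y ≠ tgt x)
    (hi : (tgt x).1 < g.length) (hj : (tgt x).2 < (g.getD (tgt x).1 []).length) :
    pvGet2 (pvW tgt val (l1 ++ x :: l2) g) (tgt x).1 (tgt x).2 = val (pvW tgt val l1 g) x := by
  have hsplit : pvW tgt val (l1 ++ x :: l2) g =
      pvW tgt val l2 (pvSet2 (pvW tgt val l1 g) (tgt x).1 (tgt x).2 (val (pvW tgt val l1 g) x)) := by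
    simp [pvW, List.foldl_append]
  rw [hsplit, pvW_get_miss _ _ _ _ _ _ h2, pvGet2_pvSet2_self]
  · rw [pvW_length]; exact hi
  · rw [pvW_rowlen]; exact hj

lemma mem_pvPairs (m n : Nat) (x : Nat × Nat) : x ∈ pvPairs m n ↔ x.1 < m ∧ x.2 < n := by
  cases x; simp [pvPairs]

lemma nodup_pvPairs (m n : Nat) : (pvPairs m n).Nodup := by
  have h : pvPairs m n = List.range m ×ˢ List.range n := by
    simp [pvPairs, List.product, SProd.sprod]
  rw [h]
  exact List.Nodup.product List.nodup_range List.nodup_range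

-- split pvPairs at a member, with the member absent from both sides through target-injectivity
lemma pvPairs_split (m n : Nat) (x : Nat × Nat) (hx : x ∈ pvPairs m n)
    (tgt : Nat × Nat → Nat × Nat)
    (hinj : ∀ y ∈ pvPairs m n, tgt y = tgt x → y = x) :
    ∃ l1 l2, pvPairs m n = l1 ++ x :: l2 ∧
      (∀ y ∈ l1, tgt y ≠ tgt x) ∧ (∀ y ∈ l2, tgt y ≠ tgt x) := by
  obtain ⟨l1, l2, hl⟩ := List.append_of_mem hx
  refine ⟨l1, l2, hl, ?_, ?_⟩
  · intro y hy he
    have hyx : y = x := hinj y (by rw [hl]; exact List.mem_append_left _ hy) he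
    have nd := nodup_pvPairs m n
    rw [hl] at nd
    have := List.disjoint_of_nodup_append nd
    exact this (hyx ▸ hy) (List.mem_cons_self ..)
  · intro y hy he
    have hyx : y = x := hinj y (by rw [hl]; exact List.mem_append_right _ (List.mem_cons_of_mem _ hy)) he
    have nd := nodup_pvPairs m n
    rw [hl] at nd
    have := (List.nodup_append.mp nd).2.1
    rw [List.nodup_cons] at this
    exact this.1 (hyx ▸ hy)

lemma resetGraph_eq_pvW (g lock : List (List Int)) (L : Nat) :
    resetGraph g lock L =
      pvW (fun p => (p.1 + L, p.2 + L)) (fun _ p => pvGet2 lock p.1 p.2) (pvPairs L L) g := rfl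

lemma addKey_eq_pvW (g key : List (List Int)) (K r c : Nat) :
    addKey g key K r c =
      pvW (fun p => (r + p.1, c + p.2))
        (fun g p => pvGet2 g (r + p.1) (c + p.2) + pvGet2 key p.1 p.2) (pvPairs K K) g := rfl

lemma rotateRightA_eq_pvW (arr : List (List Int)) :
    rotateRightA arr =
      pvW (fun p => (p.2, arr.length - 1 - p.1)) (fun _ p => pvGet2 arr p.1 p.2)
        (pvPairs arr.length arr.length) arr := rfl

lemma resetGraph_get (g lock : List (List Int)) (L p q : Nat) (hs : Shape L g) :
    pvGet2 (resetGraph g lock L) p q =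
      if L ≤ p ∧ p < 2 * L ∧ L ≤ q ∧ q < 2 * L then pvGet2 lock (p - L) (q - L)
      else pvGet2 g p q := by
  rw [resetGraph_eq_pvW]
  split
  case isTrue hc =>
    have hx : ((p - L, q - L) : Nat × Nat) ∈ pvPairs L L :=
      (mem_pvPairs ..).2 ⟨by omega, by omega⟩
    obtain ⟨l1, l2, hl, hm1, hm2⟩ := pvPairs_split L L (p - L, q - L) hx (fun p : Nat × Nat => (p.1 + L, p.2 + L)) (by
      intro y hy he
      have hyb := (mem_pvPairs ..).1 hy
      rw [Prod.ext_iff] at he ⊢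
      simp only at he ⊢
      omega)
    have htx : ((fun p : Nat × Nat => (p.1 + L, p.2 + L)) (p - L, q - L)) = (p, q) := by
      simp only [Prod.mk.injEq, true_and, and_true]; omega
    have hb1 : p < g.length := by rw [hs.1]; omega
    have hb2 : q < (g.getD p []).length := by rw [hs.2 p (by omega)]; omega
    have := pvW_get_hit (fun p : Nat × Nat => (p.1 + L, p.2 + L))
      (fun _ p => pvGet2 lock p.1 p.2) l1 (p - L, q - L) l2 g hm1 hm2
      (by rw [htx]; exact hb1) (by rw [htx]; exact hb2)
    rw [htx] at this
    rw [hl, this]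
  case isFalse hc =>
    apply pvW_get_miss
    intro x hxm he
    have hxb := (mem_pvPairs ..).1 hxm
    simp only [Prod.mk.injEq, true_and, and_true] at he
    omega

lemma addKey_get (g key : List (List Int)) (L K r c p q : Nat) (hs : Shape L g)
    (hr : r + K ≤ 3 * L) (hc : c + K ≤ 3 * L) :
    pvGet2 (addKey g key K r c) p q =
      pvGet2 g p q +
        (if r ≤ p ∧ p < r + K ∧ c ≤ q ∧ q < c + K then pvGet2 key (p - r) (q - c) else 0) := by
  rw [addKey_eq_pvW]
  split
  case isTrue hcnd =>
    have hx : ((p - r, q - c) : Nat × Nat) ∈ pvPairs K K :=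
      (mem_pvPairs ..).2 ⟨by omega, by omega⟩
    obtain ⟨l1, l2, hl, hm1, hm2⟩ := pvPairs_split K K (p - r, q - c) hx (fun p : Nat × Nat => (r + p.1, c + p.2)) (by
      intro y hy he
      have hyb := (mem_pvPairs ..).1 hy
      rw [Prod.ext_iff] at he ⊢
      simp only at he ⊢
      omega)
    have htx : ((fun p : Nat × Nat => (r + p.1, c + p.2)) (p - r, q - c)) = (p, q) := by
      simp only [Prod.mk.injEq, true_and, and_true]; omega
    have hb1 : p < g.length := by rw [hs.1]; omega
    have hb2 : q < (g.getD p []).length := by rw [hs.2 p (by omega)]; omega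
    have hhit := pvW_get_hit (fun p : Nat × Nat => (r + p.1, c + p.2))
      (fun g p => pvGet2 g (r + p.1) (c + p.2) + pvGet2 key p.1 p.2) l1 (p - r, q - c) l2 g hm1 hm2
      (by rw [htx]; exact hb1) (by rw [htx]; exact hb2)
    rw [htx] at hhit
    rw [hl, hhit]
    simp only
    rw [show r + (p - r) = p by omega, show c + (q - c) = q by omega]
    rw [pvW_get_miss _ _ _ _ _ _ (by
      intro y hy
      have : (r + y.1, c + y.2) ≠ (r + (p - r), c + (q - c)) := hm1 y hy
      rw [show r + (p - r) = p by omega, show c + (q - c) = q by omega] at this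
      exact this)]
  case isFalse hcnd =>
    rw [pvW_get_miss _ _ _ _ _ _ (by
      intro x hxm he
      have hxb := (mem_pvPairs ..).1 hxm
      simp only [Prod.mk.injEq, true_and, and_true] at he
      omega)]
    omega

lemma rotateRightA_get (key : List (List Int)) (K p q : Nat) (hK : key.length = K)
    (hrow : ∀ t < K, K ≤ (key.getD t []).length) (hp : p < K) (hq : q < K) :
    pvGet2 (rotateRightA key) p q = pvGet2 key (K - 1 - q) p := by
  rw [rotateRightA_eq_pvW, hK]
  have hx : ((K - 1 - q, p) : Nat × Nat) ∈ pvPairs K K :=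
    (mem_pvPairs ..).2 ⟨by omega, by omega⟩
  obtain ⟨l1, l2, hl, hm1, hm2⟩ := pvPairs_split K K (K - 1 - q, p) hx (fun x : Nat × Nat => (x.2, K - 1 - x.1)) (by
    intro y hy he
    obtain ⟨y1, y2⟩ := y
    have hyb := (mem_pvPairs ..).1 hy
    simp only [Prod.mk.injEq, true_and, and_true] at he ⊢
    omega)
  have htx : ((fun x : Nat × Nat => (x.2, K - 1 - x.1)) (K - 1 - q, p)) = (p, q) := by
    simp only [Prod.mk.injEq, true_and, and_true]; omega
  have hb1 : p < key.length := by omega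
  have hb2 : q < (key.getD p []).length := by have := hrow p hp; omega
  have hhit := pvW_get_hit (fun x : Nat × Nat => (x.2, K - 1 - x.1))
    (fun _ x => pvGet2 key x.1 x.2) l1 (K - 1 - q, p) l2 key hm1 hm2
    (by rw [htx]; exact hb1) (by rw [htx]; exact hb2)
  rw [htx] at hhit
  rw [hl, hhit]

lemma resetGraph_shape (g lock L) (hs : Shape L g) : Shape L (resetGraph g lock L) := by
  refine ⟨by rw [resetGraph_eq_pvW, pvW_length]; exact hs.1, fun p hp => ?_⟩
  rw [resetGraph_eq_pvW, pvW_rowlen]; exact hs.2 p hp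

lemma addKey_shape (g key L K r c) (hs : Shape L g) : Shape L (addKey g key K r c) := by
  refine ⟨by rw [addKey_eq_pvW, pvW_length]; exact hs.1, fun p hp => ?_⟩
  rw [addKey_eq_pvW, pvW_rowlen]; exact hs.2 p hp

lemma resetGraph_center (g lock : List (List Int)) (L : Nat) (hs : Shape L g) :
    Center L lock (resetGraph g lock L) := by
  intro i hi j hj
  rw [resetGraph_get g lock L _ _ hs, if_pos (by omega)]
  congr 1 <;> omega

lemma checkLock_eq_fitsB (g key lock rot : List (List Int)) (L K r c : Nat)
    (hs : Shape L g) (hcen : Center L lock g) (hkr : KeyRel K key rot)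
    (hr : r + K ≤ 3 * L) (hc : c + K ≤ 3 * L) :
    checkLock (addKey g key K r c) L = fitsB lock rot L K r c := by
  unfold checkLock fitsB
  refine all_congr_mem _ _ _ (fun i hi => ?_)
  rw [List.mem_range] at hi
  refine all_congr_mem _ _ _ (fun j hj => ?_)
  rw [List.mem_range] at hj
  simp only
  congr 1
  rw [addKey_get g key L K r c _ _ hs hr hc, hcen i hi j hj]
  congr 1
  by_cases hcond : r ≤ i + L ∧ i + L < r + K ∧ c ≤ j + L ∧ j + L < c + K
  · rw [if_pos hcond, if_pos (by push_cast; omega)]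
    have ha : ((i : Int) + L - r).toNat = i + L - r := by omega
    have hb : ((j : Int) + L - c).toNat = j + L - c := by omega
    rw [ha, hb]
    exact hkr.2.2 (i + L - r) (by omega) (j + L - c) (by omega)
  · rw [if_neg hcond, if_neg (by push_cast; omega)]

lemma placeLoop_eq (key lock rot : List (List Int)) (L K : Nat) (hkr : KeyRel K key rot)
    (rcs : List (Nat × Nat)) (hb : ∀ rc ∈ rcs, rc.1 + K ≤ 3 * L ∧ rc.2 + K ≤ 3 * L) :
    ∀ g, Shape L g → Center L lock g →
      (placeLoop key lock L K rcs g).1 = rcs.any (fun rc => fitsB lock rot L K rc.1 rc.2) ∧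
      ((placeLoop key lock L K rcs g).1 = false →
        Shape L (placeLoop key lock L K rcs g).2 ∧ Center L lock (placeLoop key lock L K rcs g).2) := by
  revert hb
  induction rcs with
  | nil => intro hb g hsp hcen; simp only [placeLoop, List.any_nil]; exact ⟨trivial, fun _ => ⟨hsp, hcen⟩⟩
  | cons rc rest ih =>
      intro hb g hsp hcen
      have hb0 := hb rc (by simp)
      have hbr : ∀ x ∈ rest, x.1 + K ≤ 3 * L ∧ x.2 + K ≤ 3 * L := fun x hx => hb x (by simp [hx])
      simp only [placeLoop]
      rw [checkLock_eq_fitsB g key lock rot L K rc.1 rc.2 hsp hcen hkr hb0.1 hb0.2]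
      by_cases hf : fitsB lock rot L K rc.1 rc.2
      · simp [hf]
      · have hsp1 : Shape L (addKey g key K rc.1 rc.2) := addKey_shape g key L K rc.1 rc.2 hsp
        have hsp' : Shape L (resetGraph (addKey g key K rc.1 rc.2) lock L) :=
          resetGraph_shape _ lock L hsp1
        have hcen' : Center L lock (resetGraph (addKey g key K rc.1 rc.2) lock L) :=
          resetGraph_center _ lock L hsp1
        have hrec := ih hbr (resetGraph (addKey g key K rc.1 rc.2) lock L) hsp' hcen'
        simp only [hf, Bool.false_eq_true, if_false, List.any_cons, Bool.false_or]
        exact hrec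

lemma any_pvPairs (n : Nat) (f : Nat → Nat → Bool) :
    (pvPairs n n).any (fun rc => f rc.1 rc.2) =
      (List.range n).any (fun r => (List.range n).any (fun c => f r c)) := by
  simp only [pvPairs, List.any_flatMap, List.any_map, Function.comp_def]

lemma rotKeyRel (key rot : List (List Int)) (K : Nat) (hkr : KeyRel K key rot) :
    KeyRel K (rotateRightA key) (rotateB rot K) := by
  obtain ⟨hK, hrow, hget⟩ := hkr
  refine ⟨by rw [rotateRightA_eq_pvW, pvW_length]; exact hK, fun p hp => ?_, fun i hi j hj => ?_⟩
  · rw [rotateRightA_eq_pvW, pvW_rowlen]; exact hrow p hp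
  · rw [rotateRightA_get key K i j hK hrow hi hj]
    rw [hget (K - 1 - j) (by omega) i hi]
    unfold pvGet2 rotateB
    rw [PySem.List.getD_map_range _ _ _ _ hi, PySem.List.getD_map_range _ _ _ _ hj]
    rfl

lemma rotLoop_eq (lock : List (List Int)) (L K : Nat) (t : Nat) :
    ∀ key rot g, KeyRel K key rot → Shape L g → Center L lock g →
      rotLoopA lock L K t key g = rotLoopB lock L K t rot := by
  induction t with
  | zero => intro key rot g _ _ _; rfl
  | succ t ih =>
      intro key rot g hkr hsp hcen
      have hb : ∀ rc ∈ pvPairs (3 * L - K) (3 * L - K), rc.1 + K ≤ 3 * L ∧ rc.2 + K ≤ 3 * L := by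
        intro rc hrc
        have := (mem_pvPairs ..).1 hrc
        omega
      obtain ⟨h1, h2⟩ := placeLoop_eq key lock rot L K hkr (pvPairs (3 * L - K) (3 * L - K)) hb g hsp hcen
      rcases hq : placeLoop key lock L K (pvPairs (3 * L - K) (3 * L - K)) g with ⟨b, g2⟩
      rw [hq] at h1 h2
      simp only at h1 h2
      rw [any_pvPairs (3 * L - K) (fun r c => fitsB lock rot L K r c)] at h1
      cases b with
      | true =>
          simp only [rotLoopA, hq, rotLoopB, ← h1, if_true]
      | false =>
          have hinv := h2 rfl
          simp only [rotLoopA, hq, rotLoopB, ← h1, Bool.false_eq_true, if_false]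
          exact ih (rotateRightA key) (rotateB rot K) g2 (rotKeyRel key rot K hkr) hinv.1 hinv.2

-- ===== VERDICT (by name: the statement is the Claim_ definition above) =====
theorem solution_spec : Claim_equal_solution := by
  intro key lock _ hpre
  unfold Spec_solution solution solution_alt
  simp only
  have hrows : ∀ p < key.length, key.length ≤ (key.getD p []).length := by
    intro p hp
    rw [List.getD_eq_getElem key [] hp]
    exact hpre.1 key[p] (List.getElem_mem hp)
  have hkr : KeyRel key.length key key := ⟨rfl, hrows, fun _ _ _ _ => rfl⟩
  have hsp0 : Shape lock.length ((List.range (3 * lock.length)).map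
      (fun _ => (List.range (3 * lock.length)).map (fun _ => (0 : Int)))) := by
    refine ⟨by simp, fun p hp => ?_⟩
    rw [PySem.List.getD_map_range _ _ _ _ hp]
    simp
  exact rotLoop_eq lock lock.length key.length 4 key key _ hkr
    (resetGraph_shape _ lock lock.length hsp0) (resetGraph_center _ lock lock.length hsp0)
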